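-- pv_equiv track=rewrite | github.com/KazukiNoSuzaku/Leetcode | Python/0555_Split_Concatenated_Strings.py | splitLoopedString
-- ===== SOURCE A (Python) =====
-- def splitLoopedString(strs):
--     strs = [max(s, s[::-1]) for s in strs]
--     res = ''
--     for i, s in enumerate(strs):
--         rest = ''.join(strs[i+1:] + strs[:i])
--         for k in range(len(s)):
--             res = max(res, s[k:] + rest + s[:k])
--             t = s[::-1]
--             res = max(res, t[k:] + rest + t[:k])
--     return res
-- ===== SOURCE B (Python) =====
-- def splitLoopedString(strs):
--     # Select the best cut by simultaneous character-by-character elimination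
--     # (Booth-style tournament over cut positions) instead of building and
--     # comparing every rotation string.
--     norm = [max(s, s[::-1]) for s in strs]
--     total = sum(len(s) for s in norm)
--     best = ''
--     for i, s in enumerate(norm):
--         rest = ''.join(norm[i + 1:]) + ''.join(norm[:i])
--         for w in (s, s[::-1]):
--             if w:
--                 doubled = w + rest + w
--                 cands = list(range(len(w)))
--                 for d in range(total):
--                     if len(cands) == 1:
--                         break
--                     m = max(doubled[k + d] for k in cands)
--                     cands = [k for k in cands if doubled[k + d] == m]
--                 k = cands[0]
--                 cand = doubled[k:k + total]
--                 if cand > best: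
--                     best = cand
--     return best
-- ===== Notes on version B (the rewrite author's own statement) =====
-- stated objective: alternative
-- what changed: Instead of A's build-and-compare of every rotation string (for each cut, materialize s[k:]+rest+s[:k] and take a running max), B selects the best cut of each (piece, orientation) family by a Booth-style simultaneous-elimination tournament on the doubled string w+rest+w: it keeps the set of cut positions whose prefix is still maximal and repeatedly filters it by the next character's maximum, materializing only one winning rotation per family.
import Mathlib
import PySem

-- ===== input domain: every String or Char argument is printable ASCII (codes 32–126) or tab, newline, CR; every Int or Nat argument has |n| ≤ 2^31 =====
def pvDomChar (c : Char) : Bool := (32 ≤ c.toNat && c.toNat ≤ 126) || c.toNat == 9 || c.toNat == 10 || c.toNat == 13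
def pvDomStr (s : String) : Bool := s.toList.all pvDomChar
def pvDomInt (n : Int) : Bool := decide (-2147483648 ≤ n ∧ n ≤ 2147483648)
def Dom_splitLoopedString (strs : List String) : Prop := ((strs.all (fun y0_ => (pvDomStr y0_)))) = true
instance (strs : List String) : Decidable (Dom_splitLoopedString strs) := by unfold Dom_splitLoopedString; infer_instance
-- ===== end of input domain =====

-- B finds the best cut of each (piece, orientation) family by simultaneous character-by-character
-- elimination of cut positions (a Booth-style tournament) instead of building and max-comparing
-- every rotation string (objective: alternative algorithm).

-- ===== PORT A =====
-- Strings are handled as their code-point lists (Python comparison = Lean '<' on toList);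
-- s[::-1] is List.reverse.
def splitLoopedString (strs : List String) : String :=
  -- strs = [max(s, s[::-1]) for s in strs]
  let strs2 : List (List Char) := strs.map (fun s => max s.toList s.toList.reverse)
  -- res = ''; for i, s in enumerate(strs): ...
  let res : List Char :=
    (PySem.List.enumerate strs2).foldl (fun res is =>
      let i := is.1
      let s := is.2
      -- rest = ''.join(strs[i+1:] + strs[:i])
      let rest := PySem.Chars.join []
        (PySem.List.slice strs2 (some (i + 1)) none ++ PySem.List.slice strs2 none (some i))
      -- for k in range(len(s)): res = max(res, s[k:] + rest + s[:k]); t = s[::-1]; res = max(res, t[k:] + rest + t[:k])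
      (PySem.List.pyRange 0 (s.length : Int) 1).foldl (fun res k =>
        let res := max res
          (PySem.List.slice s (some k) none ++ rest ++ PySem.List.slice s none (some k))
        let t := s.reverse
        max res
          (PySem.List.slice t (some k) none ++ rest ++ PySem.List.slice t none (some k))) res) []
  String.ofList res

-- ===== PORT B =====
-- the inner 'for d in range(total)' elimination loop of Source B; Python's range(total) over Nat d is
-- List.range total, and doubled[k + d] is List.getD (k + d): the index is provably in range for
-- every reachable k and d, so getD never returns its default and is exact here.
def pvElim (doubled : List Char) (total : Nat) (cands : List Nat) : List Nat :=
  (List.range total).foldl (fun c d =>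
    if 1 < c.length then
      -- m = max(doubled[k + d] for k in cands)
      let m := (PySem.List.max? (c.map (fun k => doubled.getD (k + d) ' ')) (fun x => x)).getD ' '
      -- cands = [k for k in cands if doubled[k + d] == m]
      c.filter (fun k => doubled.getD (k + d) ' ' == m)
    else c) cands

-- the body of 'for w in (s, s[::-1])' in Source B; cands[0] is List.headD (cands is provably
-- nonempty) and doubled[k:k+total] with 0 ≤ k, k + total ≤ len(doubled) is drop-then-take.
def pvFamily (total : Nat) (rest best w : List Char) : List Char :=
  if w = [] then best               -- 'if w:' guard: empty orientation contributes nothing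
  else
    let doubled := w ++ rest ++ w
    let c := pvElim doubled total (List.range w.length)
    let k := c.headD 0              -- k = cands[0]
    let cand := (doubled.drop k).take total   -- cand = doubled[k:k + total]
    if best < cand then cand else best        -- if cand > best: best = cand

def splitLoopedString_alt (strs : List String) : String :=
  -- norm = [max(s, s[::-1]) for s in strs]
  let norm : List (List Char) := strs.map (fun s => max s.toList s.toList.reverse)
  -- total = sum(len(s) for s in norm)
  let total : Nat := (norm.map List.length).sum
  -- best = ''; for i, s in enumerate(norm): ...
  let best : List Char :=
    (PySem.List.enumerate norm).foldl (fun best is =>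
      let i := is.1
      let s := is.2
      -- rest = ''.join(norm[i+1:]) + ''.join(norm[:i])
      let rest := PySem.Chars.join [] (PySem.List.slice norm (some (i + 1)) none)
               ++ PySem.Chars.join [] (PySem.List.slice norm none (some i))
      -- for w in (s, s[::-1]): ...
      pvFamily total rest (pvFamily total rest best s) s.reverse) []
  String.ofList best

-- ===== PRECONDITION & SPEC =====
def Spec_splitLoopedString (strs : List String) (out : String) : Prop := out = splitLoopedString_alt strs
instance (strs : List String) (out : String) : Decidable (Spec_splitLoopedString strs out) := by unfold Spec_splitLoopedString; infer_instance

-- ===== CLAIM (what is proved, stated in full; the proofs are below) =====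
def Claim_equal_splitLoopedString : Prop := ∀ (strs : List String), Dom_splitLoopedString strs → Spec_splitLoopedString strs (splitLoopedString strs)

-- ===== LEMMAS AND PROOFS =====

-- Proof-side reification of A's loop body (defeq to the lambda in the port).
def pvRestA (full : List (List Char)) (i : Int) : List Char :=
  PySem.Chars.join []
    (PySem.List.slice full (some (i + 1)) none ++ PySem.List.slice full none (some i))

def pvStepA (full : List (List Char)) (res : List Char) (is : Int × List Char) : List Char :=
  (PySem.List.pyRange 0 (is.2.length : Int) 1).foldl (fun r k =>
    max (max r (PySem.List.slice is.2 (some k) none ++ pvRestA full is.1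
                  ++ PySem.List.slice is.2 none (some k)))
        (PySem.List.slice is.2.reverse (some k) none ++ pvRestA full is.1
                  ++ PySem.List.slice is.2.reverse none (some k))) res

-- Proof-side reification of B's loop body (defeq to the lambda in the port).
def pvStepB (total : Nat) (full : List (List Char)) (best : List Char) (is : Int × List Char) : List Char :=
  let rest := PySem.Chars.join [] (PySem.List.slice full (some (is.1 + 1)) none)
           ++ PySem.Chars.join [] (PySem.List.slice full none (some is.1))
  pvFamily total rest (pvFamily total rest best is.2) is.2.reverse

-- The ordered list of all rotation candidates, with the prefix already flattened.
def pvCands (before : List Char) : List (List Char) → List (List Char)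
  | [] => []
  | s :: rs =>
      ((List.range s.length).flatMap (fun k =>
        [s.drop k ++ (rs.flatten ++ before) ++ s.take k,
         s.reverse.drop k ++ (rs.flatten ++ before) ++ s.reverse.take k]))
      ++ pvCands (before ++ s) rs

-- The d-prefix of the rotation starting at cut k (inside the doubled string W).
def pvPfx (W : List Char) (k d : Nat) : List Char := (W.drop k).take d

-- The set of cut positions whose d-prefix is lexicographically maximal.
def pvMaxset (W : List Char) (n d : Nat) : List Nat :=
  (List.range n).filter (fun k => decide (∀ j ∈ List.range n, pvPfx W j d ≤ pvPfx W k d))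

-- One family's candidate strings, in cut order.
def pvFam (w rest : List Char) : List (List Char) :=
  (List.range w.length).map (fun k => w.drop k ++ rest ++ w.take k)

lemma pv_join_nil_flatten (ls : List (List Char)) : PySem.Chars.join [] ls = ls.flatten := by
  induction ls with
  | nil => simp [PySem.Chars.join_nil]
  | cons a l ih =>
      cases l with
      | nil => simp [PySem.Chars.join_singleton]
      | cons b m => rw [PySem.Chars.join_cons_cons, List.flatten_cons, ← ih]; simp

lemma pv_flatMap_map {α β γ : Type} (l : List β) (f : β → γ) (h : γ → List α) :
    (l.map f).flatMap h = l.flatMap (fun b => h (f b)) := by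
  induction l with
  | nil => rfl
  | cons a t ih => simp [ih]

lemma pv_pyRange_flatMap {α : Type} (n : Nat) (h : Int → List α) :
    (PySem.List.pyRange 0 (n : Int) 1).flatMap h
      = (List.range n).flatMap (fun k : Nat => h (k : Int)) := by
  rw [PySem.List.pyRange_one]
  have e : ((n : Int) - 0).toNat = n := by simp
  rw [e, pv_flatMap_map]
  simp

lemma pv_foldl_max_pair {α β : Type} [LinearOrder α] (L : List β) (f g : β → α) (r : α) :
    L.foldl (fun r k => max (max r (f k)) (g k)) r
      = (L.flatMap (fun k => [f k, g k])).foldl max r := by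
  induction L generalizing r with
  | nil => rfl
  | cons a l ih => simp [ih]

lemma pv_flatMap_congr {α β : Type} (l : List β) (f g : β → List α)
    (h : ∀ b ∈ l, f b = g b) : l.flatMap f = l.flatMap g := by
  induction l with
  | nil => rfl
  | cons a l ih =>
      simp only [List.flatMap_cons, h a (List.mem_cons_self ..),
        ih (fun b hb => h b (List.mem_cons_of_mem _ hb))]

-- A's outer loop: the whole fold is the running max of all candidates.
lemma pv_A_outer (ns pre : List (List Char)) (r : List Char) :
    (PySem.List.enumerate ns (pre.length : Int)).foldl (pvStepA (pre ++ ns)) r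
      = (pvCands pre.flatten ns).foldl max r := by
  induction ns generalizing pre r with
  | nil => simp [PySem.List.enumerate_nil, pvCands]
  | cons s rs ih =>
      rw [PySem.List.enumerate_cons, List.foldl_cons]
      have h1 : PySem.List.slice (pre ++ s :: rs) (some ((pre.length : Int) + 1)) none = rs := by
        have e1 : ((pre.length : Int) + 1) = ((pre.length + 1 : Nat) : Int) := by push_cast; ring
        rw [e1, PySem.List.slice_from_natCast, List.append_cons,
          List.drop_left' (by simp)]
      have h2 : PySem.List.slice (pre ++ s :: rs) none (some (pre.length : Int)) = pre := by
        rw [PySem.List.slice_to_natCast, List.take_left]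
      have hrest : pvRestA (pre ++ s :: rs) (pre.length : Int) = rs.flatten ++ pre.flatten := by
        rw [pvRestA, h1, h2, pv_join_nil_flatten, List.flatten_append]
      have hstep : pvStepA (pre ++ s :: rs) r ((pre.length : Int), s)
          = ((List.range s.length).flatMap (fun k =>
              [s.drop k ++ (rs.flatten ++ pre.flatten) ++ s.take k,
               s.reverse.drop k ++ (rs.flatten ++ pre.flatten) ++ s.reverse.take k])).foldl max r := by
        simp only [pvStepA, hrest]
        rw [pv_foldl_max_pair, pv_pyRange_flatMap]
        congr 1
        apply pv_flatMap_congr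
        intro k hk
        simp only [PySem.List.slice_from_natCast, PySem.List.slice_to_natCast]
      rw [hstep]
      have hih := ih (pre ++ [s]) (((List.range s.length).flatMap (fun k =>
              [s.drop k ++ (rs.flatten ++ pre.flatten) ++ s.take k,
               s.reverse.drop k ++ (rs.flatten ++ pre.flatten) ++ s.reverse.take k])).foldl max r)
      have e2 : ((pre.length : Int) + 1) = (((pre ++ [s]).length : Nat) : Int) := by
        simp
      have e3 : pre ++ s :: rs = (pre ++ [s]) ++ rs := by simp
      rw [e2, e3, hih]
      simp only [pvCands]
      rw [List.foldl_append]
      congr 1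
      simp [List.flatten_append]

-- ---- lexicographic facts about equal-length lists extended by one character ----

lemma pv_append_lt (a : List Char) : ∀ (b : List Char) (x y : Char), a.length = b.length →
    (a ++ [x] < b ++ [y] ↔ a < b ∨ (a = b ∧ x < y)) := by
  induction a with
  | nil =>
      intro b x y h
      cases b with
      | nil => simp [List.cons_lt_cons_iff]
      | cons q b' => simp at h
  | cons p a' ih =>
      intro b x y h
      cases b with
      | nil => simp at h
      | cons q b' =>
          simp only [List.cons_append, List.cons_lt_cons_iff, List.cons.injEq]
          rw [ih b' x y (by simpa using h)]
          tauto

lemma pv_append_le (a b : List Char) (x y : Char) (h : a.length = b.length) :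
    (a ++ [x] ≤ b ++ [y] ↔ a < b ∨ (a = b ∧ x ≤ y)) := by
  rw [le_iff_lt_or_eq, pv_append_lt a b x y h]
  constructor
  · rintro ((h1 | ⟨h1, h2⟩) | h1)
    · exact Or.inl h1
    · exact Or.inr ⟨h1, le_of_lt h2⟩
    · obtain ⟨h2, h3⟩ := List.append_inj h1 h
      exact Or.inr ⟨h2, le_of_eq (by simpa using h3)⟩
  · rintro (h1 | ⟨h1, h2⟩)
    · exact Or.inl (Or.inl h1)
    · rcases lt_or_eq_of_le h2 with h3 | h3
      · exact Or.inl (Or.inr ⟨h1, h3⟩)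
      · exact Or.inr (by rw [h1, h3])

-- ---- generic max-fold facts ----

lemma pv_exists_max {α β : Type} [LinearOrder β] (f : α → β) (l : List α) (h : l ≠ []) :
    ∃ k ∈ l, ∀ j ∈ l, f j ≤ f k := by
  induction l with
  | nil => exact absurd rfl h
  | cons a t ih =>
      cases t with
      | nil => exact ⟨a, List.mem_cons_self .., by simp⟩
      | cons b t' =>
          obtain ⟨k, hk, hmax⟩ := ih (by simp)
          by_cases hle : f k ≤ f a
          · refine ⟨a, List.mem_cons_self .., ?_⟩
            intro j hj
            rcases List.mem_cons.mp hj with rfl | hj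
            · exact le_refl _
            · exact le_trans (hmax j hj) hle
          · refine ⟨k, List.mem_cons_of_mem _ hk, ?_⟩
            intro j hj
            rcases List.mem_cons.mp hj with rfl | hj
            · exact le_of_not_ge hle
            · exact hmax j hj

lemma pv_foldl_max_eq {α : Type} [LinearOrder α] (L : List α) (M e : α)
    (hM : M ∈ L) (hub : ∀ x ∈ L, x ≤ M) : L.foldl max e = max e M := by
  apply le_antisymm
  · rcases PySem.List.foldl_max_mem L e with h | h
    · rw [h]; exact le_max_left ..
    · exact le_max_of_le_right (hub _ h)
  · exact max_le (PySem.List.le_foldl_max L e).1 ((PySem.List.le_foldl_max L e).2 M hM)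

-- ---- the elimination loop computes the set of prefix-maximal cut positions ----

lemma pv_mem_maxset (W : List Char) (n d k : Nat) :
    k ∈ pvMaxset W n d ↔ k < n ∧ ∀ j < n, pvPfx W j d ≤ pvPfx W k d := by
  simp [pvMaxset, List.mem_filter, List.mem_range]

lemma pv_maxset_zero (W : List Char) (n : Nat) : pvMaxset W n 0 = List.range n := by
  apply List.filter_eq_self.mpr
  intro k _
  simp [pvPfx]

lemma pv_maxset_ne_nil (W : List Char) (n d : Nat) (hn : 0 < n) : pvMaxset W n d ≠ [] := by
  obtain ⟨k, hk, hmax⟩ := pv_exists_max (fun k => pvPfx W k d) (List.range n)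
    (by simp [List.range_eq_nil]; omega)
  have : k ∈ pvMaxset W n d := by
    rw [pv_mem_maxset]
    exact ⟨List.mem_range.mp hk, fun j hj => hmax j (List.mem_range.mpr hj)⟩
  exact List.ne_nil_of_mem this

lemma pv_pfx_length (W : List Char) (n T j d : Nat) (hW : W.length = n + T)
    (hj : j < n) (hd : d ≤ T) : (pvPfx W j d).length = d := by
  simp only [pvPfx, List.length_take, List.length_drop]
  omega

lemma pv_pfx_succ (W : List Char) (n T k d : Nat) (hW : W.length = n + T)
    (hk : k < n) (hd : d < T) :
    pvPfx W k (d + 1) = pvPfx W k d ++ [W.getD (k + d) ' '] := by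
  have hkd : k + d < W.length := by omega
  have hdrop : d < (W.drop k).length := by simp [List.length_drop]; omega
  rw [pvPfx, pvPfx, List.take_add_one, List.getElem?_drop,
    List.getElem?_eq_getElem hkd, List.getD_eq_getElem _ _ hkd]
  rfl

-- strict prefix order is preserved by one elimination round
lemma pv_pfx_lt_succ (W : List Char) (n T j k d : Nat) (hW : W.length = n + T)
    (hj : j < n) (hk : k < n) (hd : d < T)
    (h : pvPfx W j d < pvPfx W k d) : pvPfx W j (d + 1) < pvPfx W k (d + 1) := by
  rw [pv_pfx_succ W n T j d hW hj hd, pv_pfx_succ W n T k d hW hk hd,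
    pv_append_lt _ _ _ _ (by rw [pv_pfx_length W n T j d hW hj (le_of_lt hd),
      pv_pfx_length W n T k d hW hk (le_of_lt hd)])]
  exact Or.inl h

-- one unguarded elimination round sends the d-maximal set to the (d+1)-maximal set
lemma pv_step_maxset (W : List Char) (n T d : Nat) (hW : W.length = n + T)
    (hn : 0 < n) (hd : d < T) :
    ((pvMaxset W n d).filter (fun k => W.getD (k + d) ' '
        == (PySem.List.max? ((pvMaxset W n d).map (fun k => W.getD (k + d) ' '))
              (fun x => x)).getD ' '))
      = pvMaxset W n (d + 1) := by
  set c := pvMaxset W n d with hc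
  have hcne : c ≠ [] := pv_maxset_ne_nil W n d hn
  obtain ⟨m, hm⟩ : ∃ m, PySem.List.max? (c.map (fun k => W.getD (k + d) ' ')) (fun x => x) = some m := by
    cases h : PySem.List.max? (c.map (fun k => W.getD (k + d) ' ')) (fun x => x) with
    | none => rw [PySem.List.max?_eq_none_iff, List.map_eq_nil_iff] at h; exact absurd h hcne
    | some m => exact ⟨m, rfl⟩
  obtain ⟨kstar, hkstar, hkstarm⟩ : ∃ k ∈ c, W.getD (k + d) ' ' = m := by
    have := PySem.List.max?_mem hm
    obtain ⟨k, hk, he⟩ := List.mem_map.mp this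
    exact ⟨k, hk, he⟩
  have hub : ∀ k ∈ c, W.getD (k + d) ' ' ≤ m := by
    intro k hk
    exact PySem.List.max?_isMax hm _ (List.mem_map.mpr ⟨k, hk, rfl⟩)
  -- all d-maximal positions share the same d-prefix
  have hcommon : ∀ k1 ∈ c, ∀ k2 ∈ c, pvPfx W k1 d = pvPfx W k2 d := by
    intro k1 h1 k2 h2
    rw [pv_mem_maxset] at h1 h2
    exact le_antisymm (h2.2 k1 h1.1) (h1.2 k2 h2.1)
  rw [hm, Option.getD_some, hc, pvMaxset, List.filter_filter]
  apply List.filter_congr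
  intro k hk
  have hkn : k < n := List.mem_range.mp hk
  have hlen : ∀ j, j < n → (pvPfx W j d).length = (pvPfx W k d).length := by
    intro j hj
    rw [pv_pfx_length W n T j d hW hj (le_of_lt hd), pv_pfx_length W n T k d hW hkn (le_of_lt hd)]
  simp only [List.mem_range]
  rw [Bool.eq_iff_iff]
  simp only [Bool.and_eq_true, decide_eq_true_eq, beq_iff_eq]
  have hmemc : ∀ j, (j < n ∧ ∀ i < n, pvPfx W i d ≤ pvPfx W j d) → j ∈ c := by
    intro j hj
    rw [hc, pv_mem_maxset]
    exact hj
  constructor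
  · rintro ⟨hchk, hmaxk⟩
    intro j hjn
    by_cases hjc : ∀ i < n, pvPfx W i d ≤ pvPfx W j d
    · have hjmem : j ∈ c := hmemc j ⟨hjn, hjc⟩
      have hkmem : k ∈ c := hmemc k ⟨hkn, hmaxk⟩
      rw [pv_pfx_succ W n T j d hW hjn hd, pv_pfx_succ W n T k d hW hkn hd,
        pv_append_le _ _ _ _ (hlen j hjn)]
      exact Or.inr ⟨hcommon j hjmem k hkmem, by rw [hchk]; exact hub j hjmem⟩
    · push Not at hjc
      obtain ⟨i, hin, hi⟩ := hjc
      have h1 : pvPfx W j d < pvPfx W i d := hi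
      have h2 : pvPfx W j d < pvPfx W k d := lt_of_lt_of_le h1 (hmaxk i hin)
      exact le_of_lt (pv_pfx_lt_succ W n T j k d hW hjn hkn hd h2)
  · intro hmax1
    have hmaxk : ∀ i < n, pvPfx W i d ≤ pvPfx W k d := by
      by_contra hcon
      push Not at hcon
      obtain ⟨i, hin, hi⟩ := hcon
      have h1 : pvPfx W k d < pvPfx W i d := hi
      have h2 := pv_pfx_lt_succ W n T k i d hW hkn hin hd h1
      exact absurd (hmax1 i hin) (not_le.mpr h2)
    refine ⟨?_, hmaxk⟩
    have hkmem : k ∈ c := hmemc k ⟨hkn, hmaxk⟩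
    have hksn : kstar < n := by
      have := hkstar; rw [hc, pv_mem_maxset] at this; exact this.1
    have h3 := hmax1 kstar hksn
    rw [pv_pfx_succ W n T kstar d hW hksn hd, pv_pfx_succ W n T k d hW hkn hd,
      hcommon kstar hkstar k hkmem, hkstarm,
      pv_append_le _ _ _ _ rfl] at h3
    rcases h3 with h3 | ⟨_, h3⟩
    · exact absurd h3 (lt_irrefl _)
    · exact le_antisymm (hub k hkmem) h3

-- elimination over all T rounds yields exactly the T-maximal cut positions
lemma pv_elim_eq (W : List Char) (n T : Nat) (hW : W.length = n + T) (hn : 0 < n) :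
    pvElim W T (List.range n) = pvMaxset W n T := by
  unfold pvElim
  suffices h : ∀ t, t ≤ T → (List.range t).foldl (fun c d =>
      if 1 < c.length then
        (c.filter (fun k => W.getD (k + d) ' '
          == (PySem.List.max? (c.map (fun k => W.getD (k + d) ' ')) (fun x => x)).getD ' '))
      else c) (List.range n) = pvMaxset W n t by
    exact h T le_rfl
  intro t ht
  induction t with
  | zero => simpa using (pv_maxset_zero W n).symm
  | succ t ih =>
      rw [List.range_succ, List.foldl_append, ih (by omega), List.foldl_cons, List.foldl_nil]
      by_cases hg : 1 < (pvMaxset W n t).length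
      · rw [if_pos hg]
        exact pv_step_maxset W n T t hW hn (by omega)
      · rw [if_neg hg]
        have hcne := pv_maxset_ne_nil W n t hn
        obtain ⟨a, hca⟩ : ∃ a, pvMaxset W n t = [a] := by
          cases h1 : pvMaxset W n t with
          | nil => exact absurd h1 hcne
          | cons a tl =>
              cases tl with
              | nil => exact ⟨a, rfl⟩
              | cons b tl2 =>
                  exact absurd (by rw [h1, List.length_cons, List.length_cons]; omega) hg
        have hs := pv_step_maxset W n T t hW hn (by omega)
        rw [hca] at hs ⊢
        rw [← hs]
        simp [PySem.List.max?_id_cons]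

-- the rotation starting at cut k, read off the doubled string
lemma pv_rot (w rest : List Char) (k : Nat) (hk : k < w.length) :
    pvPfx (w ++ rest ++ w) k (w.length + rest.length) = w.drop k ++ rest ++ w.take k := by
  rw [pvPfx, List.append_assoc, List.drop_append_of_le_length (le_of_lt hk),
    ← List.append_assoc, List.take_append]
  have h1 : w.length + rest.length - (w.drop k ++ rest).length = k := by
    simp only [List.length_append, List.length_drop]; omega
  have h2 : (w.drop k ++ rest).length ≤ w.length + rest.length := by
    simp only [List.length_append, List.length_drop]; omega
  rw [h1, List.take_of_length_le h2]

-- the chosen cut's full candidate is the maximum of its family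
lemma pv_family_eq (w rest best : List Char) :
    pvFamily (w.length + rest.length) rest best w = (pvFam w rest).foldl max best := by
  by_cases hw : w = []
  · subst hw; simp [pvFamily, pvFam]
  · rw [pvFamily, if_neg hw]
    have hWlen : (w ++ rest ++ w).length = w.length + (w.length + rest.length) := by
      simp; omega
    have hnpos : 0 < w.length := List.length_pos_of_ne_nil hw
    have helim := pv_elim_eq (w ++ rest ++ w) w.length (w.length + rest.length) hWlen hnpos
    have hcne : pvElim (w ++ rest ++ w) (w.length + rest.length) (List.range w.length) ≠ [] := by
      rw [helim]; exact pv_maxset_ne_nil _ _ _ hnpos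
    obtain ⟨k0, tl, hc⟩ : ∃ k0 tl,
        pvElim (w ++ rest ++ w) (w.length + rest.length) (List.range w.length) = k0 :: tl := by
      cases h1 : pvElim (w ++ rest ++ w) (w.length + rest.length) (List.range w.length) with
      | nil => exact absurd h1 hcne
      | cons a b => exact ⟨a, b, rfl⟩
    have hk0 : k0 ∈ pvMaxset (w ++ rest ++ w) w.length (w.length + rest.length) := by
      rw [← helim, hc]; exact List.mem_cons_self ..
    rw [pv_mem_maxset] at hk0
    obtain ⟨hk0n, hk0max⟩ := hk0
    have hM : pvPfx (w ++ rest ++ w) k0 (w.length + rest.length) ∈ pvFam w rest := by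
      rw [pv_rot w rest k0 hk0n, pvFam]
      exact List.mem_map.mpr ⟨k0, List.mem_range.mpr hk0n, rfl⟩
    have hub : ∀ x ∈ pvFam w rest,
        x ≤ pvPfx (w ++ rest ++ w) k0 (w.length + rest.length) := by
      intro x hx
      obtain ⟨k, hk, rfl⟩ := List.mem_map.mp hx
      rw [← pv_rot w rest k (List.mem_range.mp hk)]
      exact hk0max k (List.mem_range.mp hk)
    have hcand : ((w ++ rest ++ w).drop ((pvElim (w ++ rest ++ w) (w.length + rest.length)
          (List.range w.length)).headD 0)).take (w.length + rest.length)
        = pvPfx (w ++ rest ++ w) k0 (w.length + rest.length) := by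
      rw [hc]; rfl
    show (if best < ((w ++ rest ++ w).drop ((pvElim (w ++ rest ++ w) (w.length + rest.length)
            (List.range w.length)).headD 0)).take (w.length + rest.length) then
          ((w ++ rest ++ w).drop ((pvElim (w ++ rest ++ w) (w.length + rest.length)
            (List.range w.length)).headD 0)).take (w.length + rest.length)
        else best) = (pvFam w rest).foldl max best
    rw [hcand, pv_foldl_max_eq _ _ best hM hub]
    rcases lt_or_ge best (pvPfx (w ++ rest ++ w) k0 (w.length + rest.length)) with hlt | hge
    · rw [if_pos hlt, max_eq_right (le_of_lt hlt)]
    · rw [if_neg (not_lt.mpr hge), max_eq_left hge]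

-- interleaved candidates are a permutation of the two family lists
lemma pv_perm_interleave {alpha beta : Type} (l : List beta) (f g : beta → alpha) :
    (l.flatMap (fun k => [f k, g k])).Perm (l.map f ++ l.map g) := by
  induction l with
  | nil => simp
  | cons a t ih =>
      simp only [List.flatMap_cons, List.map_cons, List.cons_append]
      exact List.Perm.cons (f a)
        (List.Perm.trans (List.Perm.cons (g a) ih) List.perm_middle.symm)

-- B's outer loop: the whole fold is the running max of all candidates.
lemma pv_B_outer (total : Nat) (ns pre : List (List Char)) (r : List Char)
    (htot : total = (pre ++ ns).flatten.length) :
    (PySem.List.enumerate ns (pre.length : Int)).foldl (pvStepB total (pre ++ ns)) r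
      = (pvCands pre.flatten ns).foldl max r := by
  induction ns generalizing pre r with
  | nil => simp [PySem.List.enumerate_nil, pvCands]
  | cons s rs ih =>
      rw [PySem.List.enumerate_cons, List.foldl_cons]
      have h1 : PySem.List.slice (pre ++ s :: rs) (some ((pre.length : Int) + 1)) none = rs := by
        have e1 : ((pre.length : Int) + 1) = ((pre.length + 1 : Nat) : Int) := by push_cast; ring
        rw [e1, PySem.List.slice_from_natCast, List.append_cons,
          List.drop_left' (by simp)]
      have h2 : PySem.List.slice (pre ++ s :: rs) none (some (pre.length : Int)) = pre := by
        rw [PySem.List.slice_to_natCast, List.take_left]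
      have htot2 : total = s.length + (rs.flatten ++ pre.flatten).length := by
        rw [htot]; simp [List.flatten_append]; omega
      have htot3 : total = s.reverse.length + (rs.flatten ++ pre.flatten).length := by
        rw [htot2]; simp
      have hstep : pvStepB total (pre ++ s :: rs) r ((pre.length : Int), s)
          = ((List.range s.length).flatMap (fun k =>
              [s.drop k ++ (rs.flatten ++ pre.flatten) ++ s.take k,
               s.reverse.drop k ++ (rs.flatten ++ pre.flatten) ++ s.reverse.take k])).foldl max r := by
        show pvFamily total (PySem.Chars.join [] (PySem.List.slice (pre ++ s :: rs) (some ((pre.length : Int) + 1)) none)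
               ++ PySem.Chars.join [] (PySem.List.slice (pre ++ s :: rs) none (some (pre.length : Int))))
             (pvFamily total _ r s) s.reverse = _
        rw [h1, h2, pv_join_nil_flatten, pv_join_nil_flatten]
        rw [show (pvFamily total (rs.flatten ++ pre.flatten) r s)
              = (pvFam s (rs.flatten ++ pre.flatten)).foldl max r from by
            rw [htot2]; exact pv_family_eq s (rs.flatten ++ pre.flatten) r]
        rw [show (pvFamily total (rs.flatten ++ pre.flatten)
                ((pvFam s (rs.flatten ++ pre.flatten)).foldl max r) s.reverse)
              = (pvFam s.reverse (rs.flatten ++ pre.flatten)).foldl max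
                  ((pvFam s (rs.flatten ++ pre.flatten)).foldl max r) from by
            rw [htot3]; exact pv_family_eq s.reverse (rs.flatten ++ pre.flatten) _]
        rw [← List.foldl_append]
        have hp2 : ((List.range s.length).flatMap (fun k =>
              [s.drop k ++ (rs.flatten ++ pre.flatten) ++ s.take k,
               s.reverse.drop k ++ (rs.flatten ++ pre.flatten) ++ s.reverse.take k])).Perm
            (pvFam s (rs.flatten ++ pre.flatten) ++ pvFam s.reverse (rs.flatten ++ pre.flatten)) := by
          have hp := pv_perm_interleave (List.range s.length)
            (fun k => s.drop k ++ (rs.flatten ++ pre.flatten) ++ s.take k)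
            (fun k => s.reverse.drop k ++ (rs.flatten ++ pre.flatten) ++ s.reverse.take k)
          simpa [pvFam, List.length_reverse] using hp
        exact (hp2.foldl_eq' (fun x _ y _ z => max_right_comm z x y) r).symm
      rw [hstep]
      have hih := ih (pre ++ [s]) (((List.range s.length).flatMap (fun k =>
              [s.drop k ++ (rs.flatten ++ pre.flatten) ++ s.take k,
               s.reverse.drop k ++ (rs.flatten ++ pre.flatten) ++ s.reverse.take k])).foldl max r)
        (by rw [htot]; simp)
      have e2 : ((pre.length : Int) + 1) = (((pre ++ [s]).length : Nat) : Int) := by simp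
      have e3 : pre ++ s :: rs = (pre ++ [s]) ++ rs := by simp
      rw [e2, e3, hih]
      simp only [pvCands]
      rw [List.foldl_append]
      congr 1
      simp [List.flatten_append]

-- ===== VERDICT (by name: the statement is the Claim_ definition above) =====
theorem splitLoopedString_spec : Claim_equal_splitLoopedString := by
  intro strs _
  unfold Spec_splitLoopedString
  set norm : List (List Char) := strs.map (fun s => max s.toList s.toList.reverse) with hnorm
  have hA : splitLoopedString strs
      = String.ofList ((PySem.List.enumerate norm (0 : Int)).foldl (pvStepA norm) []) := rfl
  have hB : splitLoopedString_alt strs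
      = String.ofList ((PySem.List.enumerate norm (0 : Int)).foldl
          (pvStepB ((norm.map List.length).sum) norm) []) := rfl
  have hAo := pv_A_outer norm [] []
  have hBo := pv_B_outer ((norm.map List.length).sum) norm [] []
    (by simp [List.length_flatten])
  simp only [List.nil_append, List.length_nil, Nat.cast_zero, List.flatten_nil] at hAo hBo
  rw [hA, hB, hAo, hBo]
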